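-- pv_equiv track=rewrite | github.com/thebrid/advent | 2015/01/test_find_floor.py | first_basement_step
-- ===== SOURCE A (Python) =====
-- def first_basement_step(directions: str) -> int | None:
--     current_floor = 0
--
--     for index, direction in enumerate(directions):
--         if direction == "(":
--             current_floor += 1
--         elif direction == ")":
--             current_floor -= 1
--
--         if current_floor < 0:
--             return index + 1
--
--     return None
-- ===== SOURCE B (Python) =====
-- def first_basement_step(directions: str) -> int | None:
--     # Phase 1: build the full cumulative-floor table.
--     deltas = [1 if c == "(" else -1 if c == ")" else 0 for c in directions]
--     prefixes = []
--     total = 0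
--     for d in deltas:
--         total += d
--         prefixes.append(total)
--     # Phase 2: find the first negative level (1-based).
--     for i, v in enumerate(prefixes):
--         if v < 0:
--             return i + 1
--     return None
-- ===== Notes on version B (the rewrite author's own statement) =====
-- stated objective: alternative
-- what changed: B splits A's fused accumulator loop into two phases: first it materialises the full prefix-sum table of floor levels, then it scans that table for the first negative entry; A instead updates and tests one counter inside a single early-returning loop.
import Mathlib
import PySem

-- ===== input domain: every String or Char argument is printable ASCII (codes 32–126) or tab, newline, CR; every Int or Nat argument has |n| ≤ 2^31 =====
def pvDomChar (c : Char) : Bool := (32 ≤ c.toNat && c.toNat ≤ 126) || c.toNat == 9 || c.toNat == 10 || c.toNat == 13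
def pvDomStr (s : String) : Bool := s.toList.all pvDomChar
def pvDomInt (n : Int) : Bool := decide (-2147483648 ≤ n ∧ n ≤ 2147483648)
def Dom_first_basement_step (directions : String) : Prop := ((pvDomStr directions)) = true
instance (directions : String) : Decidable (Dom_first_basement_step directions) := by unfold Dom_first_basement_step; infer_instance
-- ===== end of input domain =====

-- B replaces A's fused accumulate-and-test loop by two phases: build the full prefix-sum table of floor levels, then scan it for the first negative entry (alternative decomposition, same cost).


-- ===== PORT A =====
def pvAgo : List Char → Int → Int → Option Int
  | [], _, _ => none
  | c :: rest, index, current_floor =>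
    let f := if c = '(' then current_floor + 1
             else if c = ')' then current_floor - 1
             else current_floor
    if f < 0 then some (index + 1) else pvAgo rest (index + 1) f

def first_basement_step (directions : String) : Option Int :=
  pvAgo directions.toList 0 0

-- ===== PORT B =====
-- B: phase 1 builds the whole prefix-sum table, phase 2 scans it for the first negative
def pvDelta (c : Char) : Int := if c = '(' then 1 else if c = ')' then -1 else 0

def pvPrefixes : List Char → Int → List Int
  | [], _ => []
  | c :: rest, total =>
    let t := total + pvDelta c
    t :: pvPrefixes rest t

def pvFindNeg : List Int → Int → Option Int
  | [], _ => none
  | v :: rest, i => if v < 0 then some (i + 1) else pvFindNeg rest (i + 1)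

def first_basement_step_alt (directions : String) : Option Int :=
  pvFindNeg (pvPrefixes directions.toList 0) 0

-- ===== PRECONDITION & SPEC =====
def Spec_first_basement_step (directions : String) (out : Option Int) : Prop := out = first_basement_step_alt directions
instance (directions : String) (out : Option Int) : Decidable (Spec_first_basement_step directions out) := by unfold Spec_first_basement_step; infer_instance

-- ===== CLAIM (what is proved, stated in full; the proofs are below) =====
def Claim_equal_first_basement_step : Prop := ∀ (directions : String), Dom_first_basement_step directions → Spec_first_basement_step directions (first_basement_step directions)

-- ===== LEMMAS AND PROOFS =====

-- ===== VERDICT (by name: the statement is the Claim_ definition above) =====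
theorem pv_go_eq (cs : List Char) : ∀ (idx floor : Int),
    pvAgo cs idx floor = pvFindNeg (pvPrefixes cs floor) idx := by
  induction cs with
  | nil => intro idx floor; rfl
  | cons c rest ih =>
    intro idx floor
    simp only [pvAgo, pvPrefixes, pvFindNeg, pvDelta]
    by_cases h1 : c = '(' <;> by_cases h2 : c = ')' <;>
      simp [h1, h2, ih] <;> ring_nf

theorem first_basement_step_spec : Claim_equal_first_basement_step := by
  intro directions _
  unfold Spec_first_basement_step first_basement_step first_basement_step_alt
  exact pv_go_eq directions.toList 0 0
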